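-- pv_equiv track=rewrite | github.com/plone/cookieplone-templates | .scripts/report_keys_usage.py | generate_versions_usage_matrix
-- ===== SOURCE A (Python) =====
-- VERSIONS_SYMBOLS = {
--     "not_used": {"title": "Not referenced by the template", "icon": "-"},
--     "used": {"title": "Used by the template", "icon": "✅"},
--     "missing": {
--         "title": "Used by the template, not declared in cookieplone-config.json",
--         "icon": "🚫",
--     },
-- }
--
-- def generate_versions_usage_matrix(
--     all_versions: set,
--     template_versions: dict,
--     all_templates: list[str],
-- ) -> list[dict]:
--     versions_usage = []
--     for key in sorted(all_versions):
--         key_report = {"version": key}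
--         for template in all_templates:
--             status = VERSIONS_SYMBOLS["not_used"]["icon"]
--             versions = template_versions.get(template, {})
--             if key in versions.get("used", []):
--                 status = VERSIONS_SYMBOLS["used"]["icon"]
--             elif key in versions.get("missing", []):
--                 status = VERSIONS_SYMBOLS["missing"]["icon"]
--             key_report[template] = status
--         versions_usage.append(key_report)
--     return versions_usage
-- ===== SOURCE B (Python) =====
-- VERSIONS_SYMBOLS = {
--     "not_used": {"title": "Not referenced by the template", "icon": "-"},
--     "used": {"title": "Used by the template", "icon": "✅"},
--     "missing": {
--         "title": "Used by the template, not declared in cookieplone-config.json",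
--         "icon": "🚫",
--     },
-- }
--
--
-- def generate_versions_usage_matrix(
--     all_versions: set,
--     template_versions: dict,
--     all_templates: list[str],
-- ) -> list[dict]:
--     not_used = VERSIONS_SYMBOLS["not_used"]["icon"]
--     used_icon = VERSIONS_SYMBOLS["used"]["icon"]
--     missing_icon = VERSIONS_SYMBOLS["missing"]["icon"]
--     # One row per version, every template cell preset to the not_used icon.
--     rows = {
--         key: {"version": key, **{template: not_used for template in all_templates}}
--         for key in sorted(all_versions)
--     }
--     # Scatter the actual used/missing entries into the table; a used entry is
--     # written after a missing one, so 'used' wins when a version is in both.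
--     for template in all_templates:
--         versions = template_versions.get(template, {})
--         for key in versions.get("missing", []):
--             if key in rows:
--                 rows[key][template] = missing_icon
--         for key in versions.get("used", []):
--             if key in rows:
--                 rows[key][template] = used_icon
--     return list(rows.values())
-- ===== Notes on version B (the rewrite author's own statement) =====
-- stated objective: faster
-- what changed: Instead of probing every version x template cell against the used/missing membership lists, B prebuilds one row per sorted version preset to the not_used icon and scatters only the actual missing/used entries into the table (used written after missing so used wins); each used/missing list is traversed once per template instead of once per cell.
import Mathlib
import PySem

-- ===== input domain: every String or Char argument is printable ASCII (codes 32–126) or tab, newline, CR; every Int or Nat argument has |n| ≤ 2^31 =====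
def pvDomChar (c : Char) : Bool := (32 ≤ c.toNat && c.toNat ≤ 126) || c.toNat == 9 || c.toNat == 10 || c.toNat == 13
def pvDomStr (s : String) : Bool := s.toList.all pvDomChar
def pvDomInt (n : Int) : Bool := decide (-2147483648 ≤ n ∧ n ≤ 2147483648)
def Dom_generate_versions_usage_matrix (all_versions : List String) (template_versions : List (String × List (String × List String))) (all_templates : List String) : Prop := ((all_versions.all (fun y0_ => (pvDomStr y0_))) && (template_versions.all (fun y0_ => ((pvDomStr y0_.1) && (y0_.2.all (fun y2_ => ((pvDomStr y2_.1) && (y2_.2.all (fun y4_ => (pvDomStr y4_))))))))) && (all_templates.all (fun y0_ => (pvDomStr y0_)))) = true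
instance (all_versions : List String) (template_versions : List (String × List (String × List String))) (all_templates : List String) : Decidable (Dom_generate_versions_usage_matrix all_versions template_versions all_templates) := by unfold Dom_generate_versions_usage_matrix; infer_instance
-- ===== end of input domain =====

-- B replaces A's per-cell membership probes by a prebuilt not_used table into which the
-- actual used/missing entries are scattered once per template (measured faster).


-- ===== PORT A =====
-- Port of A: for each key in sorted(all_versions), probe every template and compute the cell status.
def generate_versions_usage_matrix (all_versions : List String) (template_versions : List (String × List (String × List String))) (all_templates : List String) : List (List (String × String)) :=
  (PySem.List.sorted all_versions (fun x => x) false).foldl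
    (fun versions_usage key =>
      let key_report : PySem.Dict String String := PySem.Dict.mk [("version", key)]
      let key_report := all_templates.foldl
        (fun key_report template =>
          let status := "-"
          let versions : PySem.Dict String (List String) :=
            PySem.Dict.mk (((PySem.Dict.mk template_versions).get? template).getD [])
          let status :=
            if (versions.getD "used" []).contains key then "✅"
            else if (versions.getD "missing" []).contains key then "🚫"
            else status
          key_report.insert template status)
        key_report
      versions_usage ++ [key_report.items])
    []

-- ===== PORT B =====
-- B: one row per version preset to the not_used icon, then scatter the actual
-- missing/used entries into the table (used written after missing, so used wins).
def generate_versions_usage_matrix_alt (all_versions : List String) (template_versions : List (String × List (String × List String))) (all_templates : List String) : List (List (String × String)) :=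
  let not_used := "-"
  let used_icon := "✅"
  let missing_icon := "🚫"
  let rows : PySem.Dict String (PySem.Dict String String) :=
    (PySem.List.sorted all_versions (fun x => x) false).foldl
      (fun rows key =>
        rows.insert key
          (all_templates.foldl (fun r template => r.insert template not_used)
            (PySem.Dict.mk [("version", key)])))
      (PySem.Dict.mk [])
  let rows := all_templates.foldl
    (fun rows template =>
      let versions : PySem.Dict String (List String) :=
        PySem.Dict.mk (((PySem.Dict.mk template_versions).get? template).getD [])
      let rows := (versions.getD "missing" []).foldl
        (fun rows key =>
          if rows.contains key then
            rows.insert key ((rows.getD key (PySem.Dict.mk [])).insert template missing_icon)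
          else rows)
        rows
      let rows := (versions.getD "used" []).foldl
        (fun rows key =>
          if rows.contains key then
            rows.insert key ((rows.getD key (PySem.Dict.mk [])).insert template used_icon)
          else rows)
        rows
      rows)
    rows
  rows.values.map PySem.Dict.items

-- ===== PRECONDITION & SPEC =====
-- all_versions is a Python set, so its List port holds distinct elements; Pre_ excludes
-- duplicate-bearing lists, on which A emits one row per occurrence while B keys rows by version.
def Pre_generate_versions_usage_matrix (all_versions : List String) (_template_versions : List (String × List (String × List String))) (_all_templates : List String) : Prop :=
  all_versions.Nodup
instance (all_versions : List String) (template_versions : List (String × List (String × List String))) (all_templates : List String) : Decidable (Pre_generate_versions_usage_matrix all_versions template_versions all_templates) := by unfold Pre_generate_versions_usage_matrix; infer_instance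

def pvWitness_generate_versions_usage_matrix : List String × (List (String × List (String × List String))) × List String :=
  (["1.0", "2.0"], [("frontend", [("used", ["1.0"]), ("missing", ["2.0"])])], ["frontend", "backend"])

def Spec_generate_versions_usage_matrix (all_versions : List String) (template_versions : List (String × List (String × List String))) (all_templates : List String) (out : List (List (String × String))) : Prop := out = generate_versions_usage_matrix_alt all_versions template_versions all_templates
instance (all_versions : List String) (template_versions : List (String × List (String × List String))) (all_templates : List String) (out : List (List (String × String))) : Decidable (Spec_generate_versions_usage_matrix all_versions template_versions all_templates out) := by unfold Spec_generate_versions_usage_matrix; infer_instance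

-- ===== CLAIM (what is proved, stated in full; the proofs are below) =====
def Claim_equal_generate_versions_usage_matrix : Prop := ∀ (all_versions : List String) (template_versions : List (String × List (String × List String))) (all_templates : List String), Dom_generate_versions_usage_matrix all_versions template_versions all_templates → Pre_generate_versions_usage_matrix all_versions template_versions all_templates → Spec_generate_versions_usage_matrix all_versions template_versions all_templates (generate_versions_usage_matrix all_versions template_versions all_templates)

-- ===== LEMMAS AND PROOFS =====

-- proof-side abbreviations for the pieces both ports are built from
def pvTV (template_versions : List (String × List (String × List String))) (t : String) : PySem.Dict String (List String) :=
  PySem.Dict.mk (((PySem.Dict.mk template_versions).get? t).getD [])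

def pvU (template_versions : List (String × List (String × List String))) (t k : String) : Bool :=
  ((pvTV template_versions t).getD "used" []).contains k

def pvM (template_versions : List (String × List (String × List String))) (t k : String) : Bool :=
  ((pvTV template_versions t).getD "missing" []).contains k

def pvStatus (template_versions : List (String × List (String × List String))) (t k : String) : String :=
  if pvU template_versions t k then "✅" else if pvM template_versions t k then "🚫" else "-"

def pvBase (k : String) : PySem.Dict String String := PySem.Dict.mk [("version", k)]

def pvRowFill (template_versions : List (String × List (String × List String))) (ts : List String) (k : String) : PySem.Dict String String :=
  ts.foldl (fun r t => r.insert t (pvStatus template_versions t k)) (pvBase k)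

def pvRowInit (ts : List String) (k : String) : PySem.Dict String String :=
  ts.foldl (fun r t => r.insert t "-") (pvBase k)

def pvStepRow (template_versions : List (String × List (String × List String))) (k t : String) (r : PySem.Dict String String) : PySem.Dict String String :=
  let r := if pvM template_versions t k then r.insert t "🚫" else r
  if pvU template_versions t k then r.insert t "✅" else r

def pvPass (icon t : String) (L : List String) (rows : PySem.Dict String (PySem.Dict String String)) : PySem.Dict String (PySem.Dict String String) :=
  L.foldl (fun rows key =>
    if rows.contains key then
      rows.insert key ((rows.getD key (PySem.Dict.mk [])).insert t icon)
    else rows) rows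

def pvStepT (template_versions : List (String × List (String × List String))) (rows : PySem.Dict String (PySem.Dict String String)) (t : String) : PySem.Dict String (PySem.Dict String String) :=
  pvPass "✅" t ((pvTV template_versions t).getD "used" []) (pvPass "🚫" t ((pvTV template_versions t).getD "missing" []) rows)

-- A in map form
theorem pvA_eq_map (all_versions : List String) (template_versions : List (String × List (String × List String))) (all_templates : List String) :
    generate_versions_usage_matrix all_versions template_versions all_templates
      = (PySem.List.sorted all_versions (fun x => x) false).map
          (fun k => (pvRowFill template_versions all_templates k).items) := by
  unfold generate_versions_usage_matrix
  exact (PySem.List.foldl_append_singleton_eq_map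
          (fun k => (pvRowFill template_versions all_templates k).items)
          (PySem.List.sorted all_versions (fun x => x) false) []).trans (List.nil_append _)

-- B in stepT form
theorem pvB_eq (all_versions : List String) (template_versions : List (String × List (String × List String))) (all_templates : List String) :
    generate_versions_usage_matrix_alt all_versions template_versions all_templates
      = (all_templates.foldl (pvStepT template_versions)
          ((PySem.List.sorted all_versions (fun x => x) false).foldl
            (fun rows k => rows.insert k (pvRowInit all_templates k)) (PySem.Dict.mk []))).values.map
          PySem.Dict.items := by
  rfl

theorem pvPass_keys (icon t : String) (L : List String) (rows : PySem.Dict String (PySem.Dict String String)) :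
    (pvPass icon t L rows).keys = rows.keys := by
  induction L generalizing rows with
  | nil => rfl
  | cons x L ih =>
    simp only [pvPass, List.foldl_cons] at ih ⊢
    by_cases hc : rows.contains x = true
    · rw [hc]; simp only [if_true]
      rw [ih, PySem.Dict.keys_insert_of_contains _ _ hc]
    · simp only [Bool.not_eq_true] at hc
      rw [hc]; simp only [Bool.false_eq_true, if_false, ih]

theorem pvPass_getD (icon t : String) (L : List String) (rows : PySem.Dict String (PySem.Dict String String)) (v : String) :
    (pvPass icon t L rows).getD v (PySem.Dict.mk [])
      = if v ∈ L ∧ v ∈ rows.keys then (rows.getD v (PySem.Dict.mk [])).insert t icon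
        else rows.getD v (PySem.Dict.mk []) := by
  induction L generalizing rows with
  | nil => simp [pvPass]
  | cons x L ih =>
    simp only [pvPass, List.foldl_cons] at ih ⊢
    by_cases hc : rows.contains x = true
    · rw [hc]; simp only [if_true]
      rw [ih]
      have hkeys : (rows.insert x ((rows.getD x (PySem.Dict.mk [])).insert t icon)).keys = rows.keys :=
        PySem.Dict.keys_insert_of_contains _ _ hc
      rw [hkeys]
      by_cases hvx : v = x
      · subst hvx
        have hmem : v ∈ rows.keys := (PySem.Dict.contains_iff_mem_keys _ _).mp hc
        simp [hmem, PySem.Dict.insert_insert_self]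
      · rw [PySem.Dict.getD_insert]
        simp [hvx, List.mem_cons]
    · simp only [Bool.not_eq_true] at hc
      rw [hc]; simp only [Bool.false_eq_true, if_false]
      rw [ih]
      by_cases hvx : v = x
      · subst hvx
        have hnm : v ∉ rows.keys := by
          intro h
          rw [(PySem.Dict.contains_iff_mem_keys rows v).mpr h] at hc
          simp at hc
        simp [hnm]
      · simp [hvx, List.mem_cons]

theorem pvStepT_keys (template_versions : List (String × List (String × List String))) (rows : PySem.Dict String (PySem.Dict String String)) (t : String) :
    (pvStepT template_versions rows t).keys = rows.keys := by
  unfold pvStepT; rw [pvPass_keys, pvPass_keys]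

theorem pvFoldT_keys (template_versions : List (String × List (String × List String))) (ts : List String) (rows : PySem.Dict String (PySem.Dict String String)) :
    (ts.foldl (pvStepT template_versions) rows).keys = rows.keys := by
  induction ts generalizing rows with
  | nil => rfl
  | cons t ts ih => rw [List.foldl_cons, ih, pvStepT_keys]

theorem pvStepT_getD (template_versions : List (String × List (String × List String))) (rows : PySem.Dict String (PySem.Dict String String)) (t v : String)
    (hv : v ∈ rows.keys) :
    (pvStepT template_versions rows t).getD v (PySem.Dict.mk [])
      = pvStepRow template_versions v t (rows.getD v (PySem.Dict.mk [])) := by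
  unfold pvStepT pvStepRow
  rw [pvPass_getD, pvPass_getD, pvPass_keys]
  have hmem : ∀ (L : List String), v ∈ L ↔ L.contains v = true := by
    intro L; exact (List.contains_iff_mem).symm
  by_cases hM : pvM template_versions t v = true
  · have hvM : v ∈ (pvTV template_versions t).getD "missing" [] := by
      unfold pvM at hM; exact List.contains_iff_mem.mp hM
    by_cases hU : pvU template_versions t v = true
    · have hvU : v ∈ (pvTV template_versions t).getD "used" [] := by
        unfold pvU at hU; exact List.contains_iff_mem.mp hU
      simp [hvM, hvU, hv, hM, hU]
    · have hvU : v ∉ (pvTV template_versions t).getD "used" [] := by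
        intro h; exact hU (by unfold pvU; exact List.contains_iff_mem.mpr h)
      simp [hvM, hvU, hv, hM, hU]
  · have hvM : v ∉ (pvTV template_versions t).getD "missing" [] := by
      intro h; exact hM (by unfold pvM; exact List.contains_iff_mem.mpr h)
    by_cases hU : pvU template_versions t v = true
    · have hvU : v ∈ (pvTV template_versions t).getD "used" [] := by
        unfold pvU at hU; exact List.contains_iff_mem.mp hU
      simp [hvM, hvU, hv, hM, hU]
    · have hvU : v ∉ (pvTV template_versions t).getD "used" [] := by
        intro h; exact hU (by unfold pvU; exact List.contains_iff_mem.mpr h)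
      simp [hvM, hvU, hv, hM, hU]

theorem pvFoldT_getD (template_versions : List (String × List (String × List String))) (ts : List String) (rows : PySem.Dict String (PySem.Dict String String)) (v : String)
    (hv : v ∈ rows.keys) :
    (ts.foldl (pvStepT template_versions) rows).getD v (PySem.Dict.mk [])
      = ts.foldl (fun r t => pvStepRow template_versions v t r) (rows.getD v (PySem.Dict.mk [])) := by
  induction ts generalizing rows with
  | nil => rfl
  | cons t ts ih =>
    rw [List.foldl_cons, List.foldl_cons,
        ih _ (by rw [pvStepT_keys]; exact hv),
        pvStepT_getD _ _ _ _ hv]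

theorem pvFill_getD (f : String → String) (ts : List String) (d : PySem.Dict String String) (c d0 : String) :
    (ts.foldl (fun r t => r.insert t (f t)) d).getD c d0 = if c ∈ ts then f c else d.getD c d0 := by
  induction ts generalizing d with
  | nil => simp
  | cons t ts ih =>
    rw [List.foldl_cons, ih, PySem.Dict.getD_insert]
    by_cases hc : c ∈ ts
    · simp [hc, List.mem_cons]
    · by_cases hct : c = t <;> simp [hc, hct, List.mem_cons]

theorem pvFill_mem_keys (f : String → String) (ts : List String) (d : PySem.Dict String String) (c : String) :
    c ∈ (ts.foldl (fun r t => r.insert t (f t)) d).keys ↔ c ∈ ts ∨ c ∈ d.keys := by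
  induction ts generalizing d with
  | nil => simp
  | cons t ts ih =>
    rw [List.foldl_cons, ih, PySem.Dict.mem_keys_insert]
    constructor
    · rintro (h | h | h) <;> simp_all [List.mem_cons]
    · rintro (h | h)
      · rcases List.mem_cons.mp h with h | h
        · right; left; exact h
        · left; exact h
      · right; right; exact h

theorem pvScatter_keys (template_versions : List (String × List (String × List String))) (v : String) (ts : List String) (r : PySem.Dict String String)
    (h : ∀ t ∈ ts, t ∈ r.keys) :
    (ts.foldl (fun r t => pvStepRow template_versions v t r) r).keys = r.keys := by
  induction ts generalizing r with
  | nil => rfl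
  | cons t ts ih =>
    have ht : t ∈ r.keys := h t List.mem_cons_self
    have hkeys : (pvStepRow template_versions v t r).keys = r.keys := by
      unfold pvStepRow
      by_cases hM : pvM template_versions t v = true
      · by_cases hU : pvU template_versions t v = true
        · simp only [hM, hU, if_true]
          rw [PySem.Dict.keys_insert_of_contains, PySem.Dict.keys_insert_of_contains]
          · exact (PySem.Dict.contains_iff_mem_keys _ _).mpr ht
          · rw [(PySem.Dict.contains_iff_mem_keys _ _)]
            rw [PySem.Dict.keys_insert_of_contains _ _ ((PySem.Dict.contains_iff_mem_keys _ _).mpr ht)]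
            exact ht
        · simp only [hM, if_true, (Bool.not_eq_true _).mp hU, Bool.false_eq_true, if_false]
          exact PySem.Dict.keys_insert_of_contains _ _ ((PySem.Dict.contains_iff_mem_keys _ _).mpr ht)
      · by_cases hU : pvU template_versions t v = true
        · simp only [(Bool.not_eq_true _).mp hM, Bool.false_eq_true, if_false, hU, if_true]
          exact PySem.Dict.keys_insert_of_contains _ _ ((PySem.Dict.contains_iff_mem_keys _ _).mpr ht)
        · simp only [(Bool.not_eq_true _).mp hM, (Bool.not_eq_true _).mp hU, Bool.false_eq_true, if_false]
    rw [List.foldl_cons, ih _ (fun x hx => by rw [hkeys]; exact h x (List.mem_cons_of_mem _ hx)), hkeys]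

theorem pvScatter_getD (template_versions : List (String × List (String × List String))) (v : String) (ts : List String) (r : PySem.Dict String String) (c : String) :
    (ts.foldl (fun r t => pvStepRow template_versions v t r) r).getD c ""
      = if c ∈ ts ∧ (pvU template_versions c v || pvM template_versions c v) = true then
          (if pvU template_versions c v = true then "✅" else "🚫")
        else r.getD c "" := by
  induction ts generalizing r with
  | nil => simp
  | cons t ts ih =>
    rw [List.foldl_cons, ih]
    by_cases hc : c ∈ ts ∧ (pvU template_versions c v || pvM template_versions c v) = true
    · simp [hc, List.mem_cons]
    · simp only [hc, if_false]
      unfold pvStepRow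
      by_cases hct : c = t
      · subst hct
        by_cases hU : pvU template_versions c v = true
        · by_cases hM : pvM template_versions c v = true <;>
            simp_all [List.mem_cons]
        · by_cases hM : pvM template_versions c v = true <;>
            simp_all [List.mem_cons]
      · by_cases hU : pvU template_versions t v = true <;>
          by_cases hM : pvM template_versions t v = true <;>
            simp_all [PySem.Dict.getD_insert, List.mem_cons]

-- the central per-version fact: scatter over the preset row = direct fill
theorem pvRow_eq (template_versions : List (String × List (String × List String))) (ts : List String) (v : String) :
    ts.foldl (fun r t => pvStepRow template_versions v t r) (pvRowInit ts v)
      = pvRowFill template_versions ts v := by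
  have hbase : (pvBase v).keys.Nodup := by simp [pvBase, PySem.Dict.keys]
  have hinit_nodup : (pvRowInit ts v).keys.Nodup := by
    unfold pvRowInit
    exact PySem.Dict.nodup_keys_foldl_insert ts (fun _ t => "-") _ hbase
  have hfill_nodup : (pvRowFill template_versions ts v).keys.Nodup := by
    unfold pvRowFill
    exact PySem.Dict.nodup_keys_foldl_insert ts (fun _ t => pvStatus template_versions t v) _ hbase
  have hmem : ∀ t ∈ ts, t ∈ (pvRowInit ts v).keys := by
    intro t ht; unfold pvRowInit
    exact (pvFill_mem_keys _ ts (pvBase v) t).mpr (Or.inl ht)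
  have hkeys : (ts.foldl (fun r t => pvStepRow template_versions v t r) (pvRowInit ts v)).keys
      = (pvRowFill template_versions ts v).keys := by
    rw [pvScatter_keys _ _ _ _ hmem]
    unfold pvRowInit pvRowFill
    rw [PySem.Dict.keys_foldl_insert ts (fun _ t => "-"),
        PySem.Dict.keys_foldl_insert ts (fun _ t => pvStatus template_versions t v)]
  have hsc_nodup : (ts.foldl (fun r t => pvStepRow template_versions v t r) (pvRowInit ts v)).keys.Nodup := by
    rw [hkeys]; exact hfill_nodup
  apply PySem.Dict.ext
  rw [PySem.Dict.items_eq_map_keys _ hsc_nodup "", PySem.Dict.items_eq_map_keys _ hfill_nodup "", hkeys]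
  apply List.map_congr_left
  intro c _
  rw [pvScatter_getD]
  unfold pvRowFill
  rw [pvFill_getD]
  have hinit : (pvRowInit ts v).getD c "" = if c ∈ ts then "-" else (pvBase v).getD c "" := by
    unfold pvRowInit; exact pvFill_getD _ _ _ _ _
  rw [hinit]
  unfold pvStatus
  by_cases hts : c ∈ ts
  · by_cases hU : pvU template_versions c v = true
    · simp [hts, hU]
    · by_cases hM : pvM template_versions c v = true <;> simp_all
  · simp [hts]

-- ===== VERDICT (by name: the statement is the Claim_ definition above) =====
theorem generate_versions_usage_matrix_spec : Claim_equal_generate_versions_usage_matrix := by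
  intro all_versions template_versions all_templates _ hpre
  unfold Spec_generate_versions_usage_matrix
  have hS : (PySem.List.sorted all_versions (fun x => x) false).Nodup :=
    ((PySem.List.sorted_perm all_versions (fun x => x) false).nodup_iff).mpr hpre
  set S := PySem.List.sorted all_versions (fun x => x) false with hSdef
  set rows0 : PySem.Dict String (PySem.Dict String String) :=
    S.foldl (fun rows k => rows.insert k (pvRowInit all_templates k)) (PySem.Dict.mk []) with hrows0
  have hitems0 : rows0.items = S.map (fun k => (k, pvRowInit all_templates k)) := by
    rw [hrows0]
    have := PySem.Dict.items_foldl_insert_fresh S (fun k => k) (fun k => pvRowInit all_templates k)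
      (PySem.Dict.mk []) (fun a _ => rfl) (by simpa using hS)
    simpa using this
  have hkeys0 : rows0.keys = S := by
    show rows0.items.map Prod.fst = S
    rw [hitems0, List.map_map]
    exact List.map_id _
  have hgetD0 : ∀ v ∈ S, rows0.getD v (PySem.Dict.mk []) = pvRowInit all_templates v := by
    intro v hv
    refine PySem.Dict.getD_of_mem_items _ ?_ ?_ _
    · rw [hitems0]; exact List.mem_map.mpr ⟨v, hv, rfl⟩
    · rw [hkeys0]; exact hS
  set rowsF := all_templates.foldl (pvStepT template_versions) rows0 with hrowsF
  have hkeysF : rowsF.keys = S := by rw [hrowsF, pvFoldT_keys, hkeys0]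
  have hnodupF : rowsF.keys.Nodup := by rw [hkeysF]; exact hS
  rw [pvA_eq_map, pvB_eq, ← hSdef, ← hrows0, ← hrowsF]
  show S.map (fun k => (pvRowFill template_versions all_templates k).items)
      = rowsF.values.map PySem.Dict.items
  have hval : rowsF.values = rowsF.items.map Prod.snd := rfl
  rw [hval, PySem.Dict.items_eq_map_keys _ hnodupF (PySem.Dict.mk []), hkeysF,
      List.map_map, List.map_map]
  apply List.map_congr_left
  intro v hv
  show (pvRowFill template_versions all_templates v).items = (rowsF.getD v (PySem.Dict.mk [])).items
  rw [hrowsF, pvFoldT_getD _ _ _ _ (by rw [hkeys0]; exact hv), hgetD0 v hv, pvRow_eq]
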